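-- pv_equiv track=rewrite | github.com/pnnl/FragNet | build/lib/fragnet/dataset/data.py | get_bond_pair_bond_graph
-- ===== SOURCE A (Python) =====
-- def get_bond_pair_bond_graph(idx_bond_index):
--
--     nnodes = len(idx_bond_index)
--     res = [[],[]]
--     for i in range(nnodes):
--         b1 = idx_bond_index[i]
--         for j in range(nnodes):
--             b2 = idx_bond_index[j]
--             if len(list(set(b1).intersection(b2))) ==1:
--                 res[0] += [i]
--                 res[1] += [j]
--
--     return res
-- ===== SOURCE B (Python) =====
-- def get_bond_pair_bond_graph(idx_bond_index):
--     # Index atoms -> bond indices once, then for each bond count shared atoms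
--     # with candidate bonds only; bonds sharing exactly one atom are emitted
--     # with the partner indices sorted (same pair order as a full double scan).
--     sets = [set(b) for b in idx_bond_index]
--     atom2bonds = {}
--     for j, s in enumerate(sets):
--         for a in s:
--             atom2bonds.setdefault(a, []).append(j)
--     r0, r1 = [], []
--     for i, s in enumerate(sets):
--         cnt = {}
--         for a in s:
--             for j in atom2bonds.get(a, []):
--                 cnt[j] = cnt.get(j, 0) + 1
--         js = sorted(k for k, c in cnt.items() if c == 1)
--         r0 += [i] * len(js)
--         r1 += js
--     return [r0, r1]
-- ===== Notes on version B (the rewrite author's own statement) =====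
-- stated objective: faster
-- what changed: Replaces the all-pairs double scan with set-intersection per pair by an atom-to-bonds inverted index: each bond only counts shared atoms with the bonds that actually share an atom and sorts the resulting partner indices.
import Mathlib
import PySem

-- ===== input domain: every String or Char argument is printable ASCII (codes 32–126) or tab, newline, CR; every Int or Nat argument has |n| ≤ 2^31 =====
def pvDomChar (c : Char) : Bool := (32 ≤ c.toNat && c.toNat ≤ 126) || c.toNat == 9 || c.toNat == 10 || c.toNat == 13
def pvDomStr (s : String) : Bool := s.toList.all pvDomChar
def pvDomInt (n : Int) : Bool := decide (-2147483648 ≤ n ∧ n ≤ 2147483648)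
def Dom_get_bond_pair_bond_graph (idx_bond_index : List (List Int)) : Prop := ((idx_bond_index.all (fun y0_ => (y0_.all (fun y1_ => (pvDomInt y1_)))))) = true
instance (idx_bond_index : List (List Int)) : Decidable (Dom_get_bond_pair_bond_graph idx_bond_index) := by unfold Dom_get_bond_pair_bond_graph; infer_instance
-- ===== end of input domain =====

-- B replaces A's all-pairs set-intersection scan by an atom→bonds inverted index
-- with per-bond shared-atom counting and a sort of the partner indices (objective: faster).


-- ===== PORT A =====
def get_bond_pair_bond_graph (idx_bond_index : List (List Int)) : List (List Int) :=
  let nnodes : Int := idx_bond_index.length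
  let res :=
    (PySem.List.pyRange 0 nnodes 1).foldl (fun (res : List Int × List Int) i =>
      let b1 := PySem.List.pyGetD idx_bond_index i []
      (PySem.List.pyRange 0 nnodes 1).foldl (fun res j =>
        let b2 := PySem.List.pyGetD idx_bond_index j []
        if PySem.Set.len (PySem.Set.inter (PySem.Set.ofList b1) b2) == 1 then
          (res.1 ++ [i], res.2 ++ [j])
        else res) res) ([], [])
  [res.1, res.2]

-- ===== PORT B =====
def get_bond_pair_bond_graph_alt (idx_bond_index : List (List Int)) : List (List Int) :=
  let sets := idx_bond_index.map (fun b => PySem.Set.ofList b)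
  -- atom2bonds.setdefault(a, []).append(j)  ==  atom2bonds[a] = atom2bonds.get(a, []) + [j]  ==  modify a [] (· ++ [j])
  let atom2bonds : PySem.Dict Int (List Int) :=
    (PySem.List.enumerate sets).foldl (fun d js =>
      js.2.foldl (fun d a => d.modify a [] (fun v => v ++ [js.1])) d) PySem.Dict.empty
  let res :=
    (PySem.List.enumerate sets).foldl (fun (r : List Int × List Int) is =>
      let cnt : PySem.Dict Int Int :=
        is.2.foldl (fun c a =>
          (atom2bonds.getD a []).foldl (fun c j => c.modify j 0 (· + 1)) c) PySem.Dict.empty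
      let js := PySem.List.sorted ((cnt.items.filter (fun kc => kc.2 == 1)).map (fun kc => kc.1)) (fun x => x) false
      (r.1 ++ List.replicate js.length is.1, r.2 ++ js)) ([], [])
  [res.1, res.2]

-- ===== PRECONDITION & SPEC =====
def Spec_get_bond_pair_bond_graph (idx_bond_index : List (List Int)) (out : List (List Int)) : Prop := out = get_bond_pair_bond_graph_alt idx_bond_index
instance (idx_bond_index : List (List Int)) (out : List (List Int)) : Decidable (Spec_get_bond_pair_bond_graph idx_bond_index out) := by unfold Spec_get_bond_pair_bond_graph; infer_instance

-- ===== CLAIM (what is proved, stated in full; the proofs are below) =====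
def Claim_equal_get_bond_pair_bond_graph : Prop := ∀ (idx_bond_index : List (List Int)), Dom_get_bond_pair_bond_graph idx_bond_index → Spec_get_bond_pair_bond_graph idx_bond_index (get_bond_pair_bond_graph idx_bond_index)

-- ===== LEMMAS AND PROOFS =====

-- shorthands for the objects both programs build
def pvR (l : List (List Int)) : List Int := PySem.List.pyRange 0 (l.length : Int) 1
def pvS (l : List (List Int)) (j : Int) : PySem.Set Int := PySem.Set.ofList (PySem.List.pyGetD l j [])
-- the per-pair predicate both programs decide: bonds i and j share exactly one atom
def pvPred (l : List (List Int)) (i j : Int) : Bool :=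
  PySem.Set.len (PySem.Set.inter (pvS l i) (PySem.List.pyGetD l j [])) == 1
def pvJ (l : List (List Int)) (i : Int) : List Int := (pvR l).filter (pvPred l i)
def pvE (l : List (List Int)) : List (Int × PySem.Set Int) :=
  PySem.List.enumerate (l.map (fun b => PySem.Set.ofList b))
def pvA2B (l : List (List Int)) : PySem.Dict Int (List Int) :=
  (pvE l).foldl (fun d js => js.2.foldl (fun d a => d.modify a [] (fun v => v ++ [js.1])) d) PySem.Dict.empty
def pvHits (l : List (List Int)) (s : PySem.Set Int) : List Int :=
  s.flatMap (fun a => (pvA2B l).getD a [])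
def pvK (l : List (List Int)) (s : PySem.Set Int) : List Int :=
  PySem.List.sorted ((((PySem.Dict.counter (pvHits l s)).items).filter (fun kc => kc.2 == 1)).map (fun kc => kc.1)) (fun x => x) false

-- a fold appending (f x, g x) blocks to both components is a pair of flatMaps
theorem pvFoldPair {α : Type} (xs : List α) (f g : α → List Int) (c d : List Int) :
    xs.foldl (fun (r : List Int × List Int) x => (r.1 ++ f x, r.2 ++ g x)) (c, d)
      = (c ++ xs.flatMap f, d ++ xs.flatMap g) := by
  induction xs generalizing c d with
  | nil => simp
  | cons x xs ih => simp [List.foldl_cons, ih]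

-- A's inner loop: conditional append of ([i],[j]) is a pair of appends of the filter
theorem pvFoldIf (xs : List Int) (p : Int → Bool) (i : Int) (r : List Int × List Int) :
    xs.foldl (fun (r : List Int × List Int) j => if p j then (r.1 ++ [i], r.2 ++ [j]) else r) r
      = (r.1 ++ (xs.filter p).map (fun _ => i), r.2 ++ xs.filter p) := by
  induction xs generalizing r with
  | nil => simp
  | cons x xs ih =>
    by_cases h : p x = true <;> simp [List.foldl_cons, h, ih]

-- nested foldl over generated blocks is a foldl over the flatMap
theorem pvFoldlFlatMap {α β γ : Type} (xs : List α) (f : α → List β) (g : γ → β → γ) (d : γ) :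
    xs.foldl (fun d x => (f x).foldl g d) d = (xs.flatMap f).foldl g d := by
  induction xs generalizing d with
  | nil => rfl
  | cons x xs ih => simp [List.foldl_cons, List.flatMap_cons, List.foldl_append, ih]

-- counting in a flatMap is summing the block counts
theorem pvCountFlatMap (xs : List Int) (f : Int → List Int) (j : Int) :
    (xs.flatMap f).count j = (xs.map (fun x => (f x).count j)).sum := by
  induction xs with
  | nil => rfl
  | cons x xs ih => simp [List.flatMap_cons, List.count_append, ih]

-- flatMap of conditional singletons is a filter
theorem pvFlatMapIf (xs : List Int) (p : Int → Bool) :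
    xs.flatMap (fun j => if p j then [j] else []) = xs.filter p := by
  induction xs with
  | nil => rfl
  | cons x xs ih => by_cases h : p x = true <;> simp [List.flatMap_cons, h, ih]

theorem pvR_pairwise (l : List (List Int)) : (pvR l).Pairwise (· < ·) := by
  unfold pvR
  rw [PySem.List.pyRange_zero_natCast]
  exact List.pairwise_lt_range.map _ (fun a b h => by exact_mod_cast h)

theorem pvR_nodup (l : List (List Int)) : (pvR l).Nodup :=
  (pvR_pairwise l).imp (fun h => ne_of_lt h)

theorem pvE_eq (l : List (List Int)) : pvE l = (pvR l).map (fun j => (j, pvS l j)) := by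
  unfold pvE pvR pvS
  rw [PySem.List.enumerate_eq_map_pyRange _ (PySem.Set.ofList [])]
  simp only [PySem.List.len, List.length_map]
  apply List.map_congr_left
  intro a _
  rw [PySem.List.pyGetD_map (fun b => PySem.Set.ofList b) l a []]

-- one block of the inverted-index pair list
theorem pvBlock (s : List Int) (hs : s.Nodup) (j a : Int) :
    ((s.map (fun a' => (a', j))).filter (fun p => p.1 == a)).map (fun p => p.2)
      = if s.contains a then [j] else [] := by
  rw [List.filter_map]
  have : ((fun p : Int × Int => p.1 == a) ∘ fun a' => (a', j)) = fun a' => a' == a := rfl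
  rw [this, List.filter_beq, List.map_replicate]
  by_cases h : a ∈ s
  · simp [List.count_eq_one_of_mem hs h, h]
  · simp [List.count_eq_zero_of_not_mem h, h]

theorem pvA2B_getD (l : List (List Int)) (a : Int) :
    (pvA2B l).getD a [] = (pvR l).filter (fun j => (pvS l j).contains a) := by
  unfold pvA2B
  have hinner : ∀ (d : PySem.Dict Int (List Int)) (js : Int × PySem.Set Int),
      js.2.foldl (fun d a => d.modify a [] (fun v => v ++ [js.1])) d
        = (js.2.map (fun a => (a, js.1))).foldl (fun d p => d.modify p.1 [] (fun v => v ++ [p.2])) d := by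
    intro d js; rw [List.foldl_map]
  simp only [hinner]
  rw [pvFoldlFlatMap, PySem.Dict.getD_foldl_modify_append]
  rw [pvE_eq, List.flatMap_map]
  simp only [List.filter_flatMap, List.map_flatMap]
  have : ∀ j ∈ pvR l,
      ((((pvS l j).map (fun a' => (a', j))).filter (fun p => p.1 == a)).map (fun p => p.2))
        = if (pvS l j).contains a then [j] else [] := by
    intro j _; exact pvBlock _ (PySem.Set.nodup_ofList _) j a
  rw [List.flatMap_congr this, pvFlatMapIf]
  simp

theorem pvHits_count (l : List (List Int)) (s : PySem.Set Int) (j : Int) :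
    (pvHits l s).count j
      = if j ∈ pvR l then s.countP (fun a => (pvS l j).contains a) else 0 := by
  unfold pvHits
  simp only [pvA2B_getD]
  rw [pvCountFlatMap]
  have hone : ∀ a : Int, ((pvR l).filter (fun j' => (pvS l j').contains a)).count j
      = if j ∈ pvR l then (if (pvS l j).contains a then 1 else 0) else 0 := by
    intro a
    by_cases hj : j ∈ pvR l
    · by_cases hc : (pvS l j).contains a = true
      · have hc' : a ∈ pvS l j := by simpa using hc
        rw [List.count_filter (p := fun j' => (pvS l j').contains a) (a := j) hc,
            List.count_eq_one_of_mem (pvR_nodup l) hj]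
        simp [hj, hc']
      · have hc' : a ∉ pvS l j := by simpa using hc
        have hnm : j ∉ (pvR l).filter (fun j' => (pvS l j').contains a) := by
          intro hmem
          exact hc (List.mem_filter.mp hmem).2
        rw [List.count_eq_zero_of_not_mem hnm]
        simp [hj, hc']
    · have hnm : j ∉ (pvR l).filter (fun j' => (pvS l j').contains a) :=
        fun h => hj (List.mem_of_mem_filter h)
      rw [List.count_eq_zero_of_not_mem hnm]
      simp [hj]
  simp only [hone]
  by_cases hj : j ∈ pvR l
  · simp only [hj, if_true]
    exact PySem.List.sum_map_ite_one_zero_nat _ s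
  · simp [hj]

-- the predicate, in counting form
theorem pvPred_eq_countP (l : List (List Int)) (i j : Int) :
    pvPred l i j = ((pvS l i).countP (fun a => (pvS l j).contains a) == 1) := by
  unfold pvPred
  have h1 : PySem.Set.inter (pvS l i) (PySem.List.pyGetD l j [])
      = (pvS l i).filter (fun x => (PySem.List.pyGetD l j []).contains x) := rfl
  have h2 : ∀ a ∈ pvS l i,
      (PySem.List.pyGetD l j []).contains a = (pvS l j).contains a := by
    intro a _
    simp [pvS, List.contains_eq_mem, PySem.Set.mem_ofList]
  rw [h1, List.filter_congr h2]
  have h3 : PySem.Set.len ((pvS l i).filter (fun a => (pvS l j).contains a))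
      = ((pvS l i).countP (fun a => (pvS l j).contains a) : Int) := by
    simp [PySem.Set.len, List.countP_eq_length_filter]
  rw [h3]
  simp

-- the sorted count-1 keys are exactly A's inner filter
theorem pvK_eq (l : List (List Int)) (i : Int) : pvK l (pvS l i) = pvJ l i := by
  unfold pvK pvJ
  rw [PySem.Dict.items_counter, List.filter_map, List.map_map]
  have hxs : ((fun kc : Int × Int => kc.1) ∘ fun k => (k, (List.count k (pvHits l (pvS l i)) : Int)))
      = id := rfl
  have hcomp : ((fun kc : Int × Int => kc.2 == 1) ∘ fun k => (k, (List.count k (pvHits l (pvS l i)) : Int)))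
      = fun k => ((List.count k (pvHits l (pvS l i)) : Int) == 1) := rfl
  rw [hcomp, hxs, List.map_id]
  apply PySem.List.sorted_eq_of_perm_of_pairwise_lt
  · rw [List.perm_ext_iff_of_nodup
      ((List.Pairwise.filter _ (pvR_pairwise l)).imp (fun h => ne_of_lt h))
      ((PySem.Set.nodup_ofList _).filter _)]
    intro j
    have hcount := pvHits_count l (pvS l i) j
    have hpred := pvPred_eq_countP l i j
    simp only [List.mem_filter, PySem.Set.mem_ofList]
    constructor
    · rintro ⟨hjR, hp⟩
      have hc1 : (pvHits l (pvS l i)).count j = 1 := by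
        rw [hcount, if_pos hjR]
        rw [hpred] at hp
        simpa using hp
      refine ⟨List.count_pos_iff.mp (by omega), ?_⟩
      simp [hc1]
    · rintro ⟨hmem, hp⟩
      have hc1 : (pvHits l (pvS l i)).count j = 1 := by
        have h2 : ((pvHits l (pvS l i)).count j : Int) = 1 := by simpa using hp
        exact_mod_cast h2
      by_cases hjR : j ∈ pvR l
      · refine ⟨hjR, ?_⟩
        rw [hpred]
        rw [hcount, if_pos hjR] at hc1
        simpa using hc1
      · rw [hcount, if_neg hjR] at hc1
        exact absurd hc1 (by omega)
  · exact List.Pairwise.filter _ (pvR_pairwise l)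

-- A in flatMap normal form
theorem pvA_nf (l : List (List Int)) :
    get_bond_pair_bond_graph l
      = [(pvR l).flatMap (fun i => (pvJ l i).map (fun _ => i)),
         (pvR l).flatMap (fun i => pvJ l i)] := by
  unfold get_bond_pair_bond_graph
  simp only []
  have hb : (fun (res : List Int × List Int) i =>
        (PySem.List.pyRange 0 (l.length : Int) 1).foldl (fun res j =>
          if PySem.Set.len (PySem.Set.inter (PySem.Set.ofList (PySem.List.pyGetD l i []))
              (PySem.List.pyGetD l j [])) == 1 then
            (res.1 ++ [i], res.2 ++ [j])
          else res) res)
      = (fun (r : List Int × List Int) i => (r.1 ++ (pvJ l i).map (fun _ => i), r.2 ++ pvJ l i)) := by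
    funext r i
    exact pvFoldIf _ (pvPred l i) i r
  rw [hb, pvFoldPair]
  simp [pvR]

-- B, with its let-bound index and enumeration named (definitional unfolding only)
def pvB2 (l : List (List Int)) : List (List Int) :=
  let res :=
    (pvE l).foldl (fun (r : List Int × List Int) is =>
      let cnt : PySem.Dict Int Int :=
        is.2.foldl (fun c a =>
          ((pvA2B l).getD a []).foldl (fun c j => c.modify j 0 (· + 1)) c) PySem.Dict.empty
      let js := PySem.List.sorted ((cnt.items.filter (fun kc => kc.2 == 1)).map (fun kc => kc.1)) (fun x => x) false
      (r.1 ++ List.replicate js.length is.1, r.2 ++ js)) ([], [])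
  [res.1, res.2]

theorem pvB2_eq (l : List (List Int)) : get_bond_pair_bond_graph_alt l = pvB2 l := rfl

-- B in flatMap normal form
theorem pvB_nf (l : List (List Int)) :
    get_bond_pair_bond_graph_alt l
      = [(pvE l).flatMap (fun is => List.replicate (pvK l is.2).length is.1),
         (pvE l).flatMap (fun is => pvK l is.2)] := by
  rw [pvB2_eq]
  unfold pvB2
  simp only []
  have hcnt : ∀ s : PySem.Set Int,
      s.foldl (fun c a => ((pvA2B l).getD a []).foldl (fun c j => c.modify j 0 (· + 1)) c) PySem.Dict.empty
        = PySem.Dict.counter (pvHits l s) := by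
    intro s
    rw [pvFoldlFlatMap, PySem.Dict.counter_eq_foldl]
    rfl
  have hb : (fun (r : List Int × List Int) (is : Int × PySem.Set Int) =>
        let cnt : PySem.Dict Int Int :=
          is.2.foldl (fun c a =>
            ((pvA2B l).getD a []).foldl (fun c j => c.modify j 0 (· + 1)) c) PySem.Dict.empty
        let js := PySem.List.sorted ((cnt.items.filter (fun kc => kc.2 == 1)).map (fun kc => kc.1)) (fun x => x) false
        (r.1 ++ List.replicate js.length is.1, r.2 ++ js))
      = (fun (r : List Int × List Int) is => (r.1 ++ List.replicate (pvK l is.2).length is.1, r.2 ++ pvK l is.2)) := by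
    funext r is
    simp only [hcnt]
    rfl
  rw [hb, pvFoldPair]
  simp

-- ===== VERDICT (by name: the statement is the Claim_ definition above) =====
theorem get_bond_pair_bond_graph_spec : Claim_equal_get_bond_pair_bond_graph := by
  intro l _
  unfold Spec_get_bond_pair_bond_graph
  rw [pvA_nf, pvB_nf, pvE_eq, List.flatMap_map, List.flatMap_map]
  simp only [pvK_eq, List.map_const']
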